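-- pv_equiv track=rewrite | github.com/Angramme/net-ana | frocio/analysis.py | compute_inequalities
-- ===== SOURCE A (Python) =====
-- def compute_inequalities(degree_freq):
--     inequalities = []
--     for k in range(1, len(degree_freq) + 1):
--         first_sum = sum(degree_freq[0:k])
--         second_sum = sum([x if x < k else k for x in degree_freq[k:len(degree_freq)]])
--         kk = k * (k - 1)
--
--         inequalities.append([first_sum, second_sum,
--                              kk])  # f'k = {k}:  {first_sum} \t<= {kk} + {second_sum} \t {"equal" if first_sum == (kk + second_sum) else ""}'
--     return inequalities
-- ===== SOURCE B (Python) =====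
-- def compute_inequalities(degree_freq):
--     # One backward pass: prefix sums give first_sum; second_sum(k) = sum(min(x,k) over suffix)
--     # is maintained by the recurrence f(k) = f(k+1) + min(d[k],k) - #{i>k : d[i] >= k+1},
--     # with that count maintained via a running count and a value->multiplicity dict.
--     n = len(degree_freq)
--     pref = [0]
--     for x in degree_freq:
--         pref.append(pref[-1] + x)
--     if n == 0:
--         return []
--     res = [[pref[n], 0, n * (n - 1)]]
--     f = 0          # second_sum for current k
--     c = 0          # #{i >= k : d[i] >= k} for current k
--     cnt = {}       # value -> multiplicity among indices >= current k
--     for k in range(n - 1, 0, -1):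
--         d = degree_freq[k]
--         f = f + (d if d < k else k) - c
--         c = c + (1 if d >= k else 0) + cnt.get(k, 0)
--         cnt[d] = cnt.get(d, 0) + 1
--         res.append([pref[k], f, k * (k - 1)])
--     res.reverse()
--     return res
-- ===== Notes on version B (the rewrite author's own statement) =====
-- stated objective: faster
-- what changed: Replaces A's per-k re-summation of the prefix and of min(x,k) over the suffix (quadratic nested passes) by a single backward pass that maintains the second sum via the recurrence f(k) = f(k+1) + min(d[k],k) - #{i>k : d[i] >= k+1}, using precomputed prefix sums, a running count of suffix elements >= k and a value->multiplicity dict.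
import Mathlib
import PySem

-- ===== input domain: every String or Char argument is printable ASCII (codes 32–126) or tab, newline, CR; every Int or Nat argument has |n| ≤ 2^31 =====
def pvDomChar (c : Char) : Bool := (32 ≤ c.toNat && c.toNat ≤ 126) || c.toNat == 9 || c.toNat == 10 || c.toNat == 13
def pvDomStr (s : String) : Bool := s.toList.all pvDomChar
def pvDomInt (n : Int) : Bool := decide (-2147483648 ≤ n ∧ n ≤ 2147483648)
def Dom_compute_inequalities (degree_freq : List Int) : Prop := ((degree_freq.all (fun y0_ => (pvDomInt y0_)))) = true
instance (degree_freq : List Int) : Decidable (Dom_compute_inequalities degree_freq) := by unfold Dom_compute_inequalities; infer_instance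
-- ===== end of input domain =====

-- B replaces A's quadratic per-k re-summation by one backward pass with prefix sums, a
-- running count of suffix elements ≥ k and a value-multiplicity dict (O(n) vs O(n^2)).

-- ===== PORT A =====
def compute_inequalities (degree_freq : List Int) : List (List Int) :=
  (PySem.List.pyRange 1 ((degree_freq.length : Int) + 1) 1).foldl
    (fun inequalities k =>
      let first_sum := (PySem.List.slice degree_freq (some 0) (some k)).sum
      let second_sum := ((PySem.List.slice degree_freq (some k) (some (degree_freq.length : Int))).map
          (fun x => if x < k then x else k)).sum
      let kk := k * (k - 1)
      inequalities ++ [[first_sum, second_sum, kk]])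
    []

-- ===== PORT B =====
-- loop body of Source B's backward pass (state: res, f = second_sum, c = count of suffix ≥ k, cnt = value counts)
def pvAltStep (degree_freq pref : List Int)
    (st : List (List Int) × Int × Int × PySem.Dict Int Int) (k : Int) :
    List (List Int) × Int × Int × PySem.Dict Int Int :=
  let d := PySem.List.pyGetD degree_freq k 0
  let f := st.2.1 + (if d < k then d else k) - st.2.2.1
  let c := st.2.2.1 + (if d ≥ k then 1 else 0) + st.2.2.2.getD k 0
  let cnt := st.2.2.2.insert d (st.2.2.2.getD d 0 + 1)
  (st.1 ++ [[PySem.List.pyGetD pref k 0, f, k * (k - 1)]], f, c, cnt)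

def compute_inequalities_alt (degree_freq : List Int) : List (List Int) :=
  let n : Int := degree_freq.length
  let pref := degree_freq.foldl (fun p x => p ++ [PySem.List.pyGetD p (-1) 0 + x]) [0]
  if n = 0 then []
  else
    let res0 : List (List Int) := [[PySem.List.pyGetD pref n 0, 0, n * (n - 1)]]
    ((PySem.List.pyRange (n - 1) 0 (-1)).foldl (pvAltStep degree_freq pref)
      (res0, 0, 0, PySem.Dict.mk [])).1.reverse

-- ===== PRECONDITION & SPEC =====
def Spec_compute_inequalities (degree_freq : List Int) (out : List (List Int)) : Prop := out = compute_inequalities_alt degree_freq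
instance (degree_freq : List Int) (out : List (List Int)) : Decidable (Spec_compute_inequalities degree_freq out) := by unfold Spec_compute_inequalities; infer_instance

-- ===== CLAIM (what is proved, stated in full; the proofs are below) =====
def Claim_equal_compute_inequalities : Prop := ∀ (degree_freq : List Int), Dom_compute_inequalities degree_freq → Spec_compute_inequalities degree_freq (compute_inequalities degree_freq)

-- ===== LEMMAS AND PROOFS =====

-- the k-th inequality triple, as mathematics: prefix sum, Σ min(x,k) over the suffix, k(k-1)
def pvF (df : List Int) (k : Nat) : Int :=
  ((df.drop k).map (fun x => if x < (k : Int) then x else (k : Int))).sum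
def pvC (df : List Int) (k : Nat) : Int :=
  ((df.drop k).countP (fun x => decide ((k : Int) ≤ x)) : Int)
def pvE (df : List Int) (k : Nat) : List Int :=
  [(df.take k).sum, pvF df k, (k : Int) * ((k : Int) - 1)]

-- running sums with start value s
def pvSums (s : Int) : List Int → List Int
  | [] => []
  | x :: xs => (s + x) :: pvSums (s + x) xs

lemma pvSums_getD (l : List Int) : ∀ (s : Int) (j : Nat), j < l.length →
    (pvSums s l).getD j 0 = s + (l.take (j + 1)).sum := by
  induction l with
  | nil => intro s j h; simp at h
  | cons x xs ih =>
    intro s j h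
    cases j with
    | zero => simp [pvSums]
    | succ j =>
      simp only [pvSums, List.getD_cons_succ, List.take_succ_cons, List.sum_cons]
      rw [ih (s + x) j (by simpa using h)]
      ring

lemma pvPref_fold (l : List Int) : ∀ (p : List Int) (s : Int),
    PySem.List.pyGetD p (-1) 0 = s →
    l.foldl (fun p x => p ++ [PySem.List.pyGetD p (-1) 0 + x]) p = p ++ pvSums s l := by
  induction l with
  | nil => intro p s _; simp [pvSums]
  | cons x xs ih =>
    intro p s hs
    simp only [List.foldl_cons, hs]
    rw [ih (p ++ [s + x]) (s + x) (PySem.List.pyGetD_neg_one_append_singleton p _ 0)]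
    simp [pvSums]

lemma pvSum_min_succ (t : List Int) (K : Int) :
    (t.map (fun x => if x < K then x else K)).sum
      = (t.map (fun x => if x < K + 1 then x else K + 1)).sum
        - ((t.countP (fun x => decide (K + 1 ≤ x))) : Int) := by
  induction t with
  | nil => simp
  | cons x xs ih =>
    simp only [List.map_cons, List.sum_cons, List.countP_cons, ih]
    by_cases h1 : x < K <;> by_cases h2 : x < K + 1 <;> by_cases h3 : K + 1 ≤ x <;>
      (simp [h1, h2, h3]; omega)

lemma pvCountP_le_succ (t : List Int) (K : Int) :
    ((t.countP (fun x => decide (K ≤ x))) : Int)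
      = ((t.countP (fun x => decide (K < x))) : Int) + ((t.count K) : Int) := by
  induction t with
  | nil => simp
  | cons x xs ih =>
    simp only [List.countP_cons, List.count_cons]
    by_cases h1 : K ≤ x <;> by_cases h2 : K < x <;> by_cases h3 : x = K <;>
      first
        | omega
        | · simp [h1, h2, h3]
            omega

-- one backward step of the second_sum recurrence
lemma pvF_succ (df : List Int) (k : Nat) (h : k < df.length) :
    pvF df k = (if df[k] < (k : Int) then df[k] else (k : Int)) + pvF df (k + 1) - pvC df (k + 1) := by
  unfold pvF pvC
  rw [List.drop_eq_getElem_cons h]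
  simp only [List.map_cons, List.sum_cons]
  have hK : ((k : Int) + 1) = ((k + 1 : Nat) : Int) := by push_cast; ring
  rw [pvSum_min_succ (df.drop (k + 1)) (k : Int), hK]
  ring

lemma pvC_succ (df : List Int) (k : Nat) (h : k < df.length) :
    pvC df k = (if (k : Int) ≤ df[k] then 1 else 0) + pvC df (k + 1)
      + ((df.drop (k + 1)).count (k : Int) : Int) := by
  unfold pvC
  rw [List.drop_eq_getElem_cons h]
  have hfun : (fun x : Int => decide ((k : Int) < x))
      = (fun x : Int => decide (((k + 1 : Nat) : Int) ≤ x)) := by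
    funext x
    simp only [decide_eq_decide]
    push_cast
    omega
  simp only [List.countP_cons]
  rw [show ((List.countP (fun x => decide ((k:Int) ≤ x)) (df.drop (k+1))
        + if decide ((k:Int) ≤ df[k]) then 1 else 0 : Nat) : Int)
      = ((List.countP (fun x => decide ((k:Int) ≤ x)) (df.drop (k+1)) : Nat) : Int)
        + ((if decide ((k:Int) ≤ df[k]) then 1 else 0 : Nat) : Int) by push_cast; ring]
  rw [pvCountP_le_succ (df.drop (k + 1)) (k : Int), hfun]
  by_cases hc : (k : Int) ≤ df[k] <;> simp [hc] <;> ring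

lemma pvLoop_inv (df pref : List Int)
    (hpref : ∀ k : Nat, 1 ≤ k → k ≤ df.length →
      PySem.List.pyGetD pref (k : Int) 0 = (df.take k).sum) :
    ∀ (k : Nat), k < df.length →
    ∀ (res : List (List Int)) (cnt : PySem.Dict Int Int),
    (∀ v, cnt.getD v 0 = ((df.drop (k + 1)).count v : Int)) →
    ((PySem.List.pyRange (k : Int) 0 (-1)).foldl (pvAltStep df pref)
       (res, pvF df (k + 1), pvC df (k + 1), cnt)).1
      = res ++ (List.range k).map (fun i => pvE df (k - i)) := by
  intro k
  induction k with
  | zero =>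
    intro hk res cnt hcnt
    rw [PySem.List.pyRange_neg_one_eq_nil (by norm_num)]
    simp
  | succ k ih =>
    intro hk res cnt hcnt
    have hklt : k < df.length := by omega
    have hcast : ((k + 1 : Nat) : Int) - 1 = (k : Nat) := by push_cast; ring
    rw [PySem.List.pyRange_neg_one_cons (by exact_mod_cast Nat.succ_pos k), hcast,
      List.foldl_cons]
    have hd : PySem.List.pyGetD df ((k + 1 : Nat) : Int) 0 = df[k + 1] := by
      rw [PySem.List.pyGetD_natCast]
      exact List.getD_eq_getElem df 0 hk
    have hf : pvF df (k + 1 + 1)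
        + (if df[k + 1] < ((k + 1 : Nat) : Int) then df[k + 1] else ((k + 1 : Nat) : Int))
        - pvC df (k + 1 + 1) = pvF df (k + 1) := by
      rw [pvF_succ df (k + 1) hk]; ring
    have hc : pvC df (k + 1 + 1) + (if df[k + 1] ≥ ((k + 1 : Nat) : Int) then 1 else 0)
        + cnt.getD ((k + 1 : Nat) : Int) 0 = pvC df (k + 1) := by
      rw [pvC_succ df (k + 1) hk, hcnt]
      by_cases hcb : ((k + 1 : Nat) : Int) ≤ df[k + 1] <;> simp only [hcb, if_pos, if_neg, not_false_iff] <;> ring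
    have hstep : pvAltStep df pref (res, pvF df (k + 1 + 1), pvC df (k + 1 + 1), cnt)
          ((k + 1 : Nat) : Int)
        = (res ++ [pvE df (k + 1)], pvF df (k + 1), pvC df (k + 1),
           cnt.insert df[k + 1] (cnt.getD df[k + 1] 0 + 1)) := by
      unfold pvAltStep
      simp only [hd, hf, hc]
      have hentry : PySem.List.pyGetD pref ((k : Int) + 1) 0 = (df.take (k + 1)).sum := by
        have h := hpref (k + 1) (by omega) (by omega)
        push_cast at h
        exact h
      simp [pvE, hentry]
    rw [hstep]
    have hcnt' : ∀ v, (cnt.insert df[k + 1] (cnt.getD df[k + 1] 0 + 1)).getD v 0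
        = ((df.drop (k + 1)).count v : Int) := by
      intro v
      rw [PySem.Dict.getD_insert, List.drop_eq_getElem_cons hk, List.count_cons]
      by_cases h : v = df[k + 1]
      · rw [if_pos h, hcnt, h]
        simp
      · rw [if_neg h, hcnt,
          show (df[k + 1] == v) = false from beq_eq_false_iff_ne.mpr (fun hq => h hq.symm)]
        simp
    rw [ih hklt (res ++ [pvE df (k + 1)]) _ hcnt']
    rw [List.range_succ_eq_map]
    simp only [List.map_cons, List.map_map, List.append_assoc, List.singleton_append]
    simp [Nat.succ_sub_succ]

lemma pvA_eq_map (df : List Int) :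
    compute_inequalities df = (List.range df.length).map (fun i => pvE df (i + 1)) := by
  simp only [compute_inequalities]
  rw [PySem.List.foldl_append_singleton_eq_map]
  rw [PySem.List.pyRange_one]
  have h1 : ((df.length : Int) + 1 - 1).toNat = df.length := by omega
  rw [h1]
  simp only [List.nil_append, List.map_map]
  apply List.map_congr_left
  intro i hi
  simp only [List.mem_range] at hi
  have hcast : (1 : Int) + (i : Int) = ((i + 1 : Nat) : Int) := by push_cast; ring
  simp only [Function.comp, hcast]
  simp only [pvE, pvF, PySem.List.slice_zero_start, PySem.List.slice_to_natCast,
    PySem.List.slice_natCast]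
  have ht : (List.drop (i + 1) df).take (df.length - (i + 1)) = List.drop (i + 1) df :=
    List.take_of_length_le (by simp)
  rw [ht]

lemma pvRev_desc (df : List Int) : ∀ m : Nat,
    ((pvE df (m + 1)) :: (List.range m).map (fun i => pvE df (m - i))).reverse
      = (List.range (m + 1)).map (fun i => pvE df (i + 1)) := by
  intro m
  induction m with
  | zero => simp
  | succ m ih =>
    have h1 : (List.range (m + 1)).map (fun i => pvE df (m + 1 - i))
        = pvE df (m + 1) :: (List.range m).map (fun i => pvE df (m - i)) := by
      rw [List.range_succ_eq_map]
      simp [List.map_map, Function.comp, Nat.succ_sub_succ]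
    rw [h1, List.reverse_cons, ih]
    simp [List.range_succ]

lemma pvB_eq_map (df : List Int) :
    compute_inequalities_alt df = (List.range df.length).map (fun i => pvE df (i + 1)) := by
  by_cases hdf : df.length = 0
  · rw [List.length_eq_zero_iff] at hdf
    subst hdf
    simp [compute_inequalities_alt]
  · have hn : 0 < df.length := Nat.pos_of_ne_zero hdf
    simp only [compute_inequalities_alt]
    rw [if_neg (by simpa using hdf)]
    have hpf : df.foldl (fun p x => p ++ [PySem.List.pyGetD p (-1) 0 + x]) [0]
        = 0 :: pvSums 0 df := by
      rw [pvPref_fold df [0] 0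
        (by simpa using PySem.List.pyGetD_neg_one_append_singleton ([] : List Int) 0 0)]
      simp
    rw [hpf]
    have hpref : ∀ k : Nat, 1 ≤ k → k ≤ df.length →
        PySem.List.pyGetD (0 :: pvSums 0 df) (k : Int) 0 = (df.take k).sum := by
      intro k h1 h2
      rw [PySem.List.pyGetD_natCast]
      cases k with
      | zero => omega
      | succ j =>
        rw [List.getD_cons_succ, pvSums_getD df 0 j (by omega)]
        exact zero_add _
    have e1 : [[PySem.List.pyGetD (0 :: pvSums 0 df) (df.length : Int) 0, (0 : Int),
          (df.length : Int) * ((df.length : Int) - 1)]] = [pvE df df.length] := by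
      rw [hpref df.length hn (le_refl _)]
      simp [pvE, pvF, List.drop_length]
    have e2 : pvF df ((df.length - 1) + 1) = 0 := by
      rw [Nat.sub_add_cancel hn]; simp [pvF, List.drop_length]
    have e3 : pvC df ((df.length - 1) + 1) = 0 := by
      rw [Nat.sub_add_cancel hn]; simp [pvC, List.drop_length]
    have hcnt0 : ∀ v : Int, (PySem.Dict.mk [] : PySem.Dict Int Int).getD v 0
        = ((df.drop ((df.length - 1) + 1)).count v : Int) := by
      intro v
      rw [Nat.sub_add_cancel hn]
      simp [List.drop_length, PySem.Dict.getD, PySem.Dict.get?]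
    have H := pvLoop_inv df (0 :: pvSums 0 df) hpref (df.length - 1) (by omega)
      [pvE df df.length] (PySem.Dict.mk []) hcnt0
    rw [e2, e3] at H
    have hlen : (df.length : Int) - 1 = ((df.length - 1 : Nat) : Int) := by omega
    rw [e1, hlen, H]
    have R := pvRev_desc df (df.length - 1)
    rw [Nat.sub_add_cancel hn] at R
    simpa using R

-- ===== VERDICT (by name: the statement is the Claim_ definition above) =====
theorem compute_inequalities_spec : Claim_equal_compute_inequalities := by
  intro df _
  unfold Spec_compute_inequalities
  rw [pvA_eq_map, pvB_eq_map]
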